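-- pv_equiv track=rewrite | github.com/Muhammad-Ahmed-Qazi/DSA-CS218 | Lab 13/Exercises/ex_01.py | HeapDelete
-- ===== SOURCE A (Python) =====
-- def HeapDelete(array):
--     if len(array) == 0:
--         return None, array   # or raise error
--
--     root_value = array[0]
--     last_value = array.pop()
--
--     # Case: only 1 element was in the heap
--     if len(array) == 0:
--         return root_value, array   # return tuple!
--
--     array[0] = last_value
--     index = 0
--
--     while True:
--         left_child_index = 2 * index + 1
--         right_child_index = 2 * index + 2
--         largest_index = index
--
--         if left_child_index < len(array) and array[left_child_index] > array[largest_index]: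
--             largest_index = left_child_index
--         if right_child_index < len(array) and array[right_child_index] > array[largest_index]:
--             largest_index = right_child_index
--
--         if largest_index != index:
--             array[index], array[largest_index] = array[largest_index], array[index]
--             index = largest_index
--         else:
--             break
--
--     return root_value, array
-- ===== SOURCE B (Python) =====
-- def _heapify(arr, i):
--     # indices of i and its existing children; pick the one holding the largest
--     # value (Python's max returns the FIRST maximal index, matching the strict
--     # '>' tie-breaking of a textbook sift-down)
--     candidates = [j for j in (i, 2 * i + 1, 2 * i + 2) if j < len(arr)]
--     largest = max(candidates, key=lambda j: arr[j])
--     if largest != i: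
--         arr[i], arr[largest] = arr[largest], arr[i]
--         _heapify(arr, largest)
--
--
-- def HeapDelete(array):
--     if not array:
--         return None, array
--     root_value = array[0]
--     last_value = array.pop()
--     if array:
--         array[0] = last_value
--         _heapify(array, 0)
--     return root_value, array
-- ===== Notes on version B (the rewrite author's own statement) =====
-- stated objective: alternative
-- what changed: The iterative while-loop sift-down (mutable index, two sequential guarded '>' comparisons updating largest_index) is replaced by a recursive heapify helper that builds the list of in-range candidate indices (i, 2i+1, 2i+2) and picks the argmax via Python's max(..., key=arr.__getitem__), recursing until no swap is needed; the single-element case falls through one merged return instead of an early return.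
import Mathlib
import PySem

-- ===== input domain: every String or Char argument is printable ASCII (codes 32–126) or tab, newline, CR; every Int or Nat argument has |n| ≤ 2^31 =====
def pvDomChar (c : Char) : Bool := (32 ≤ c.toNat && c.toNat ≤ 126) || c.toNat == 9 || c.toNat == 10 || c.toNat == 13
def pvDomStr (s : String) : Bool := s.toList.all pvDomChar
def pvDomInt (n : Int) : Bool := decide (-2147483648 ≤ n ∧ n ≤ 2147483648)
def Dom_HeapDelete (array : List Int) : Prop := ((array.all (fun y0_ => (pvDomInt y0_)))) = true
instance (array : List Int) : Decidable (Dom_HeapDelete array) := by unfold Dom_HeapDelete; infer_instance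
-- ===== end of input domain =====

-- B replaces A's iterative while-loop sift-down by a recursive heapify choosing the
-- argmax over the in-range candidate indices (alternative decomposition, not faster).
-- Both Pythons mutate `array` in place identically (pop + element assignments); the
-- equivalence proved here is about the returned (root, array) value.

-- Python's simultaneous swap: a[i], a[j] = a[j], a[i] (RHS read first).
def pySwap (a : List Int) (i j : Nat) : List Int :=
  (a.set i (a.getD j 0)).set j (a.getD i 0)

-- ===== PORT A =====
-- one iteration's largest_index computation (the two guarded '>' comparisons, in order)
def largestA (arr : List Int) (i : Nat) : Nat :=
  let li1 := if 2*i+1 < arr.length ∧ arr.getD (2*i+1) 0 > arr.getD i 0 then 2*i+1 else i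
  if 2*i+2 < arr.length ∧ arr.getD (2*i+2) 0 > arr.getD li1 0 then 2*i+2 else li1

-- A's while-loop: state = (array, index); loop while a swap happened.  The index strictly
-- increases below arr.length on every iteration, so fuel = arr.length (the call below)
-- is never exhausted: it only makes the recursion structural.
def siftA (fuel : Nat) (arr : List Int) (index : Nat) : List Int :=
  match fuel with
  | 0 => arr
  | fuel+1 =>
    if largestA arr index ≠ index then
      siftA fuel (pySwap arr index (largestA arr index)) (largestA arr index)
    else arr

def HeapDelete (array : List Int) : Option Int × List Int :=
  if array.length = 0 then (none, array)
  else
    let root := array.getD 0 0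
    let arr1 := array.dropLast
    let last := array.getD (array.length - 1) 0
    if arr1.length = 0 then (some root, arr1)
    else
      let arr2 := arr1.set 0 last
      (some root, siftA arr2.length arr2 0)

-- ===== PORT B =====
-- B's recursive heapify: candidates = in-range indices among (i, 2i+1, 2i+2),
-- largest = max(candidates, key=lambda j: arr[j]) (first maximal, as in Python).
-- Fuel as for siftA: a structural-recursion guard that is never exhausted.
def heapifyB (fuel : Nat) (arr : List Int) (i : Nat) : List Int :=
  match fuel with
  | 0 => arr
  | fuel+1 =>
    match PySem.List.max?
        (([i, 2*i+1, 2*i+2]).filter (fun j => decide (j < arr.length)))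
        (fun j => arr.getD j 0) with
    | none => arr  -- Python max would raise on an empty list; unreachable (i < len at every call)
    | some largest =>
      if largest ≠ i then heapifyB fuel (pySwap arr i largest) largest else arr

def HeapDelete_alt (array : List Int) : Option Int × List Int :=
  match array with
  | [] => (none, [])
  | x :: xs =>
    let arr1 := (x :: xs).dropLast
    let last := ((x :: xs).getLast?).getD 0
    (some x,
      if arr1.isEmpty then arr1
      else
        let arr2 := arr1.set 0 last
        heapifyB arr2.length arr2 0)

-- ===== PRECONDITION & SPEC =====
def Spec_HeapDelete (array : List Int) (out : Option Int × List Int) : Prop := out = HeapDelete_alt array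
instance (array : List Int) (out : Option Int × List Int) : Decidable (Spec_HeapDelete array out) := by unfold Spec_HeapDelete; infer_instance

-- ===== CLAIM (what is proved, stated in full; the proofs are below) =====
def Claim_equal_HeapDelete : Prop := ∀ (array : List Int), Dom_HeapDelete array → Spec_HeapDelete array (HeapDelete array)

-- ===== LEMMAS AND PROOFS =====

theorem largestA_spec (arr : List Int) (i : Nat) :
    largestA arr i = i ∨ (i < largestA arr i ∧ largestA arr i < arr.length) := by
  unfold largestA
  dsimp only
  split_ifs with h1 h2 h3 <;> omega

-- B's argmax over the filtered candidates is exactly A's largest_index chain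
theorem largest_eq (arr : List Int) (i : Nat) :
    PySem.List.max? (([i, 2*i+1, 2*i+2]).filter (fun j => decide (j < arr.length)))
      (fun j => arr.getD j 0)
    = if i < arr.length then some (largestA arr i) else none := by
  by_cases hi : i < arr.length <;>
    by_cases hl : 2*i+1 < arr.length <;>
    by_cases hr : 2*i+2 < arr.length <;>
    simp only [PySem.List.max?, largestA, List.filter, hi, hl, hr, decide_true,
      decide_false, List.foldl, gt_iff_lt, if_true, if_false] <;>
    first
      | omega
      | (split_ifs <;> simp_all <;> omega)

theorem sift_eq (fuel : Nat) : ∀ (arr : List Int) (i : Nat),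
    siftA fuel arr i = heapifyB fuel arr i := by
  induction fuel with
  | zero => intro arr i; rfl
  | succ f ih =>
    intro arr i
    have hle := largest_eq arr i
    simp only [siftA, heapifyB, hle]
    by_cases h : largestA arr i = i
    · rw [if_neg (by simp [h])]
      by_cases hi : i < arr.length
      · rw [if_pos hi]
        simp [h]
      · rw [if_neg hi]
    · have ⟨h1, h2⟩ := (largestA_spec arr i).resolve_left h
      have hi : i < arr.length := Nat.lt_trans h1 h2
      rw [if_pos h, if_pos hi]
      dsimp only
      rw [if_pos h, ih]

theorem heapDelete_eq (array : List Int) : HeapDelete array = HeapDelete_alt array := by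
  cases array with
  | nil => rfl
  | cons x xs =>
    have hlast : (x :: xs).getD ((x :: xs).length - 1) 0 = ((x :: xs).getLast?).getD 0 := by
      rw [List.getD_eq_getElem?_getD, List.getLast?_eq_getElem?]
    unfold HeapDelete HeapDelete_alt
    rw [if_neg (by simp)]
    dsimp only
    by_cases h : xs = []
    · subst h
      simp [List.dropLast]
    · have hne : (x :: xs).dropLast ≠ [] := by
        cases xs with
        | nil => exact absurd rfl h
        | cons y ys => simp [List.dropLast]
      have h0 : ¬((x :: xs).dropLast.length = 0) := by
        simpa using h
      rw [if_neg h0, if_neg (by simp only [List.isEmpty_iff]; exact hne)]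
      rw [hlast, sift_eq]
      simp

-- ===== VERDICT (by name: the statement is the Claim_ definition above) =====
theorem HeapDelete_spec : Claim_equal_HeapDelete := by
  intro array _
  unfold Spec_HeapDelete
  exact heapDelete_eq array
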